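-- pv_equiv track=rewrite | github.com/pierremont/challenges | Sum of array singles.py | functie
-- ===== SOURCE A (Python) =====
-- def functie(arr):
--     temp_arr = []
--     sum = 0
--     for i in arr:
--         if i in temp_arr: #create a temporary list from which you subtract the item if it's already there
--             sum -= i
--         else:
--             sum += i
--             temp_arr.append(i)
--     return sum
-- ===== SOURCE B (Python) =====
-- def functie(arr):
--     return 2 * sum(set(arr)) - sum(arr)
-- ===== Notes on version B (the rewrite author's own statement) =====
-- stated objective: faster
-- what changed: Replaces the membership-tested accumulation loop (quadratic list scans) with the closed-form identity 2*sum(set(arr)) - sum(arr).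
import Mathlib
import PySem

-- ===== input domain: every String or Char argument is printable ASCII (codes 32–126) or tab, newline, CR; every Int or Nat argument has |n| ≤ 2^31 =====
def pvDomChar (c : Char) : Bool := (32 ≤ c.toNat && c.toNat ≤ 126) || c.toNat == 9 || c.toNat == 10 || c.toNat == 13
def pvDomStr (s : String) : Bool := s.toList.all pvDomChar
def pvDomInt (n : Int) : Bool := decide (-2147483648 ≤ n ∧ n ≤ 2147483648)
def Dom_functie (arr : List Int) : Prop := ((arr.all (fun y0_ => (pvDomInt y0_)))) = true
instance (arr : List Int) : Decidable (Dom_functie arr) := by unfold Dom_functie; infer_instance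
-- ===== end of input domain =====

-- B replaces A's membership-tested accumulation loop with the closed form 2*sum(set(arr)) - sum(arr); measurably faster (O(n) vs O(n^2)).


-- ===== PORT A =====
def functie (arr : List Int) : Int :=
  (arr.foldl
    (fun (st : List Int × Int) i =>
      if st.1.contains i then (st.1, st.2 - i) else (st.1 ++ [i], st.2 + i))
    ([], 0)).2

-- ===== PORT B =====
def functie_alt (arr : List Int) : Int :=
  2 * (PySem.Set.ofList arr).sum - arr.sum

-- ===== PRECONDITION & SPEC =====
def Spec_functie (arr : List Int) (out : Int) : Prop := out = functie_alt arr
instance (arr : List Int) (out : Int) : Decidable (Spec_functie arr out) := by unfold Spec_functie; infer_instance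

-- ===== CLAIM (what is proved, stated in full; the proofs are below) =====
def Claim_equal_functie : Prop := ∀ (arr : List Int), Dom_functie arr → Spec_functie arr (functie arr)

-- ===== LEMMAS AND PROOFS =====

-- Loop invariant: A's fold from state (t, s) ends at s + 2*(new distinct sum) - 2*t.sum - arr.sum,
-- where the new distinct elements are those collected by Set.add starting from t.
theorem functie_fold_inv (arr : List Int) : ∀ (t : List Int) (s : Int),
    (arr.foldl
      (fun (st : List Int × Int) i =>
        if st.1.contains i then (st.1, st.2 - i) else (st.1 ++ [i], st.2 + i))
      (t, s)).2
    = s + 2 * (arr.foldl PySem.Set.add t).sum - 2 * t.sum - arr.sum := by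
  induction arr with
  | nil => intro t s; simp
  | cons i rest ih =>
    intro t s
    simp only [List.foldl_cons, PySem.Set.add, PySem.Set.contains]
    by_cases h : t.contains i
    · simp only [h, if_true, ih, List.sum_cons]; ring
    · simp only [h, Bool.false_eq_true, if_false, ih, List.sum_cons, List.sum_append,
        List.sum_nil]
      ring

-- ===== VERDICT (by name: the statement is the Claim_ definition above) =====
theorem functie_spec : Claim_equal_functie := by
  intro arr _
  show functie arr = functie_alt arr
  rw [functie, functie_alt, functie_fold_inv, PySem.Set.ofList_eq_foldl]
  simp only [List.sum_nil]
  ring
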